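-- pv_equiv track=rewrite | github.com/furio976/genio | src/study_ai/processing.py | _find_best_context_sentence
-- ===== SOURCE A (Python) =====
-- from typing import List, Optional, Tuple
--
-- def _find_best_context_sentence(sentences: List[str], keyword: str) -> Optional[str]:
-- 	keyword_lc = keyword.lower()
-- 	best: Optional[str] = None
-- 	best_len = 10**9
-- 	for s in sentences:
-- 		if keyword_lc in s.lower():
-- 			l = len(s)
-- 			if l < best_len:
-- 				best = s
-- 				best_len = l
-- 	return best
-- ===== SOURCE B (Python) =====
-- from typing import List, Optional
--
-- def _find_best_context_sentence(sentences: List[str], keyword: str) -> Optional[str]: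
-- 	keyword_lc = keyword.lower()
-- 	for s in sorted(sentences, key=len):
-- 		if keyword_lc in s.lower():
-- 			return s
-- 	return None
-- ===== Notes on version B (the rewrite author's own statement) =====
-- stated objective: idiomatic
-- what changed: Replaces the manual min-tracking loop with a sentinel length by a stable length-sort followed by returning the first lowercased match (stability makes the earliest among equal-length matches win, exactly A's strict '<').
import Mathlib
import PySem

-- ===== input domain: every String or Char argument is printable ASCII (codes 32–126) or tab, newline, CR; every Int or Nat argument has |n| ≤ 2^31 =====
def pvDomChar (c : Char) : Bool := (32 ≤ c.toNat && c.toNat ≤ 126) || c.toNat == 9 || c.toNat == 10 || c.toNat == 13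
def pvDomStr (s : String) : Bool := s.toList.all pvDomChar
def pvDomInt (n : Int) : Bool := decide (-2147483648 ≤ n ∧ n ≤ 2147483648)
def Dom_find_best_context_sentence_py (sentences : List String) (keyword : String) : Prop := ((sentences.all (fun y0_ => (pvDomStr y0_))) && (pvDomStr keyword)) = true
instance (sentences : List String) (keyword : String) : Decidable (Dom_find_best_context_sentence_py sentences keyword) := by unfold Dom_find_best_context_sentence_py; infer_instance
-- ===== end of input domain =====

-- B replaces A's sentinel-initialised min-tracking scan by a stable length-sort followed by
-- taking the first lowercased match (objective: idiomatic; similar cost).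

-- ===== PORT A =====
def find_best_context_sentence_py (sentences : List String) (keyword : String) : Option String :=
  let keyword_lc := PySem.Str.lower keyword
  (sentences.foldl
    (fun (acc : Option String × Int) s =>
      if PySem.Str.isIn keyword_lc (PySem.Str.lower s) then
        if PySem.Str.len s < acc.2 then (some s, PySem.Str.len s) else acc
      else acc)
    (none, 10 ^ 9)).1

-- ===== PORT B =====
def find_best_context_sentence_py_alt (sentences : List String) (keyword : String) : Option String :=
  let keyword_lc := PySem.Str.lower keyword
  (PySem.List.sorted sentences (fun s => PySem.Str.len s) false).find?
    (fun s => PySem.Str.isIn keyword_lc (PySem.Str.lower s))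

-- ===== PRECONDITION & SPEC =====
-- Pre_ excludes lists containing a sentence of at least 10^9 characters: there A's sentinel
-- best_len = 10**9 silently makes it ignore matches of that length or longer.
def Pre_find_best_context_sentence_py (sentences : List String) (keyword : String) : Prop :=
  (sentences.all (fun s => decide (PySem.Str.len s < 10 ^ 9))) = true
instance (sentences : List String) (keyword : String) : Decidable (Pre_find_best_context_sentence_py sentences keyword) := by unfold Pre_find_best_context_sentence_py; infer_instance

def pvWitness_find_best_context_sentence_py : List String × String := (["The cat sat.", "A cat!"], "CAT")

def Spec_find_best_context_sentence_py (sentences : List String) (keyword : String) (out : Option String) : Prop := out = find_best_context_sentence_py_alt sentences keyword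
instance (sentences : List String) (keyword : String) (out : Option String) : Decidable (Spec_find_best_context_sentence_py sentences keyword out) := by unfold Spec_find_best_context_sentence_py; infer_instance

-- ===== CLAIM (what is proved, stated in full; the proofs are below) =====
def Claim_equal_find_best_context_sentence_py : Prop := ∀ (sentences : List String) (keyword : String), Dom_find_best_context_sentence_py sentences keyword → Pre_find_best_context_sentence_py sentences keyword → Spec_find_best_context_sentence_py sentences keyword (find_best_context_sentence_py sentences keyword)

-- ===== LEMMAS AND PROOFS =====

-- the common description: among the sentences satisfying p, the one of minimal length,
-- earliest in the list among equal lengths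
def pvBest (p : String → Bool) : List String → Option String
  | [] => none
  | x :: t =>
    if p x then
      match pvBest p t with
      | none => some x
      | some z => if PySem.Str.len z < PySem.Str.len x then some z else some x
    else pvBest p t

-- merge an earlier candidate b with a best-of-the-rest o (tie goes to b)
def pvMerge (b o : Option String) : Option String :=
  match o with
  | none => b
  | some z =>
    match b with
    | none => some z
    | some y => if PySem.Str.len z < PySem.Str.len y then some z else some y

-- the later candidate x against an earlier first-match b (tie goes to b)
def pvCand (b : Option String) (x : String) : Option String :=
  match b with
  | none => some x
  | some z => if PySem.Str.len x < PySem.Str.len z then some x else some z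

theorem pvMerge_none (b : Option String) : pvMerge b none = b := rfl
theorem pvMerge_none_some (z : String) : pvMerge none (some z) = some z := rfl
theorem pvMerge_some_some (y z : String) :
    pvMerge (some y) (some z) = if PySem.Str.len z < PySem.Str.len y then some z else some y := rfl
theorem pvMerge_none_left (o : Option String) : pvMerge none o = o := by cases o <;> rfl
theorem pvCand_none (x : String) : pvCand none x = some x := rfl
theorem pvCand_some (z x : String) :
    pvCand (some z) x = if PySem.Str.len x < PySem.Str.len z then some x else some z := rfl

theorem pvFoldA (p : String → Bool) (xs : List String) (y : String) :
    (xs.foldl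
      (fun (acc : Option String × Int) s =>
        if p s then
          if PySem.Str.len s < acc.2 then (some s, PySem.Str.len s) else acc
        else acc)
      (some y, PySem.Str.len y)).1 = pvMerge (some y) (pvBest p xs) := by
  induction xs generalizing y with
  | nil => simp only [List.foldl_nil, pvBest, pvMerge_none]
  | cons x t ih =>
    simp only [List.foldl_cons, pvBest]
    by_cases hp : p x
    · simp only [hp, if_true]
      by_cases hlt : PySem.Str.len x < PySem.Str.len y
      · rw [if_pos hlt, ih x]
        cases hbt : pvBest p t with
        | none => simp only [pvMerge_none, pvMerge_none_some, pvMerge_some_some]; rw [if_pos hlt]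
        | some z =>
          simp only [pvMerge_none, pvMerge_none_some, pvMerge_some_some]
          split_ifs <;>
              simp only [pvMerge_none, pvMerge_none_some, pvMerge_some_some] <;>
              split_ifs <;> first | rfl | omega
      · rw [if_neg hlt, ih y]
        cases hbt : pvBest p t with
        | none => simp only [pvMerge_none, pvMerge_none_some, pvMerge_some_some]; rw [if_neg hlt]
        | some z =>
          simp only [pvMerge_none, pvMerge_none_some, pvMerge_some_some]
          split_ifs <;>
              simp only [pvMerge_none, pvMerge_none_some, pvMerge_some_some] <;>
              split_ifs <;> first | rfl | omega
    · simp only [hp, Bool.false_eq_true, if_false]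
      exact ih y

theorem pvFoldA0 (p : String → Bool) (xs : List String)
    (h : ∀ s ∈ xs, PySem.Str.len s < 10 ^ 9) :
    (xs.foldl
      (fun (acc : Option String × Int) s =>
        if p s then
          if PySem.Str.len s < acc.2 then (some s, PySem.Str.len s) else acc
        else acc)
      (none, 10 ^ 9)).1 = pvBest p xs := by
  cases xs with
  | nil => rfl
  | cons x t =>
    simp only [List.foldl_cons, pvBest]
    by_cases hp : p x
    · have hx : PySem.Str.len x < 10 ^ 9 := h x (by simp)
      simp only [hp, if_true]
      rw [if_pos hx, pvFoldA p t x]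
      cases hbt : pvBest p t with
      | none => simp only [pvMerge_none]
      | some z => simp only [pvMerge_some_some]
    · simp only [hp, Bool.false_eq_true, if_false]
      exact pvFoldA0 p t (fun s hs => h s (by simp [hs]))

theorem pvFindInsertBy (p : String → Bool) (x : String) (acc : List String)
    (hs : acc.Pairwise (fun a b => PySem.Str.len a ≤ PySem.Str.len b)) :
    (PySem.List.insertBy (fun a b => decide (PySem.Str.len a < PySem.Str.len b)) x acc).find? p
      = (if p x then pvCand (acc.find? p) x else acc.find? p) := by
  induction acc with
  | nil =>
    by_cases hp : p x <;> simp [PySem.List.insertBy, List.find?_cons, hp, pvCand_none]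
  | cons a rest ih =>
    have hs' : rest.Pairwise (fun a b => PySem.Str.len a ≤ PySem.Str.len b) :=
      (List.pairwise_cons.mp hs).2
    have hhead : ∀ z ∈ rest, PySem.Str.len a ≤ PySem.Str.len z :=
      (List.pairwise_cons.mp hs).1
    simp only [PySem.List.insertBy]
    by_cases hxa : PySem.Str.len x < PySem.Str.len a
    · rw [if_pos (by simpa using hxa)]
      by_cases hp : p x
      · rw [List.find?_cons_of_pos hp, if_pos hp]
        cases hfz : (a :: rest).find? p with
        | none => rw [pvCand_none]
        | some z =>
          have hz : z ∈ a :: rest := List.mem_of_find?_eq_some hfz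
          have haz : PySem.Str.len a ≤ PySem.Str.len z := by
            rcases List.mem_cons.mp hz with h | h
            · exact h ▸ le_refl _
            · exact hhead z h
          rw [pvCand_some, if_pos (lt_of_lt_of_le hxa haz)]
      · rw [List.find?_cons_of_neg hp, if_neg hp]
    · rw [if_neg (by simpa using hxa)]
      by_cases hpa : p a
      · rw [List.find?_cons_of_pos hpa, List.find?_cons_of_pos hpa]
        by_cases hp : p x
        · rw [if_pos hp, pvCand_some, if_neg hxa]
        · rw [if_neg hp]
      · rw [List.find?_cons_of_neg hpa, List.find?_cons_of_neg hpa, ih hs']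

theorem pvInsertByPairwise (x : String) (acc : List String)
    (hs : acc.Pairwise (fun a b => PySem.Str.len a ≤ PySem.Str.len b)) :
    (PySem.List.insertBy (fun a b => decide (PySem.Str.len a < PySem.Str.len b)) x acc).Pairwise
      (fun a b => PySem.Str.len a ≤ PySem.Str.len b) := by
  induction acc with
  | nil => simp [PySem.List.insertBy]
  | cons a rest ih =>
    have hs' : rest.Pairwise (fun a b => PySem.Str.len a ≤ PySem.Str.len b) :=
      (List.pairwise_cons.mp hs).2
    have hhead : ∀ z ∈ rest, PySem.Str.len a ≤ PySem.Str.len z :=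
      (List.pairwise_cons.mp hs).1
    simp only [PySem.List.insertBy]
    by_cases hxa : PySem.Str.len x < PySem.Str.len a
    · simp only [hxa, decide_true, if_true]
      refine List.pairwise_cons.mpr ⟨?_, hs⟩
      intro z hz
      rcases List.mem_cons.mp hz with h | h
      · exact h ▸ le_of_lt hxa
      · exact le_of_lt (lt_of_lt_of_le hxa (hhead z h))
    · simp only [hxa, decide_false, if_false]
      refine List.pairwise_cons.mpr ⟨?_, ih hs'⟩
      intro z hz
      rcases (PySem.List.mem_insertBy _ x z rest).mp hz with h | h
      · exact h ▸ le_of_not_gt hxa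
      · exact hhead z h

theorem pvFoldB (p : String → Bool) (xs : List String) (acc : List String)
    (hs : acc.Pairwise (fun a b => PySem.Str.len a ≤ PySem.Str.len b)) :
    ((xs.foldl (fun acc x =>
        PySem.List.insertBy (fun a b => decide (PySem.Str.len a < PySem.Str.len b)) x acc) acc).find? p)
      = pvMerge (acc.find? p) (pvBest p xs) := by
  induction xs generalizing acc with
  | nil => simp only [List.foldl_nil, pvBest, pvMerge_none]
  | cons x t ih =>
    simp only [List.foldl_cons, pvBest]
    rw [ih _ (pvInsertByPairwise x acc hs), pvFindInsertBy p x acc hs]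
    by_cases hp : p x
    · simp only [hp, if_true]
      cases hb : acc.find? p with
      | none =>
        simp only [pvCand_none]
        cases hbt : pvBest p t with
        | none => simp only [pvMerge_none, pvMerge_none_some]
        | some z => simp only [pvMerge_none_some, pvMerge_some_some]; split_ifs <;> rfl
      | some y =>
        simp only [pvCand_some]
        by_cases hxy : PySem.Str.len x < PySem.Str.len y
        · rw [if_pos hxy]
          cases hbt : pvBest p t with
          | none => simp only [pvMerge_none, pvMerge_some_some]; rw [if_pos hxy]
          | some z =>
            simp only [pvMerge_none, pvMerge_none_some, pvMerge_some_some]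
            split_ifs <;>
              simp only [pvMerge_none, pvMerge_none_some, pvMerge_some_some] <;>
              split_ifs <;> first | rfl | omega
        · rw [if_neg hxy]
          cases hbt : pvBest p t with
          | none => simp only [pvMerge_none, pvMerge_some_some]; rw [if_neg hxy]
          | some z =>
            simp only [pvMerge_none, pvMerge_none_some, pvMerge_some_some]
            split_ifs <;>
              simp only [pvMerge_none, pvMerge_none_some, pvMerge_some_some] <;>
              split_ifs <;> first | rfl | omega
    · simp only [hp, Bool.false_eq_true, if_false]

-- ===== VERDICT (by name: the statement is the Claim_ definition above) =====
theorem find_best_context_sentence_py_spec : Claim_equal_find_best_context_sentence_py := by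
  intro sentences keyword _ hpre
  unfold Spec_find_best_context_sentence_py
  unfold find_best_context_sentence_py find_best_context_sentence_py_alt
  have hlen : ∀ s ∈ sentences, PySem.Str.len s < 10 ^ 9 := by
    intro s hs
    have := (List.all_eq_true.mp hpre) s hs
    simpa using this
  rw [pvFoldA0 (fun s => PySem.Str.isIn (PySem.Str.lower keyword) (PySem.Str.lower s)) sentences hlen]
  rw [PySem.List.sorted_eq_foldl_insertBy]
  rw [pvFoldB (fun s => PySem.Str.isIn (PySem.Str.lower keyword) (PySem.Str.lower s)) sentences [] (by simp)]
  simp only [List.find?_nil]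
  rw [pvMerge_none_left]
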